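-- pv_equiv track=rewrite | github.com/Astap21/HydroClutch_test | Stend_GUI/main_s.py | check_crc_16
-- ===== SOURCE A (Python) =====
-- def my_crc16(buffer, my_len):
--     # Функция считают котрольную суммы CRC16-ARC и меняет 1 и 2 байты местами
--     polynom = 0xA001
--     crc16ret = 0
--     for i in range(my_len):
--         number = buffer[i]
--         crc16ret ^= number
--         crc16ret &= 0xFFFF
--         for i in range(8):
--             if (crc16ret & 0x0001):
--                 crc16ret = (crc16ret >> 1) ^ polynom
--             else:
--                 crc16ret = crc16ret >> 1
--             crc16ret &= 0xFFFF
--     crc16ret = hex(crc16ret)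
--     crc16ret = crc16ret[2:]
--     while len(crc16ret) < 4:
--         crc16ret = '0' + crc16ret
--     first_part = crc16ret[:2]
--     second_part = crc16ret[2:]
--     crc16ret = first_part + ' ' + second_part + ' '
--
--     return crc16ret
--
-- def check_crc_16(my_list):
--     # если ошибка связано с индексом массива то возвращаем FALSE
--     try:
--         len_data = my_list[1]
--         control_crc16 = my_crc16(my_list, len_data - 2)
--         crc_list = []
--         one_byte = ''
--         for one_char in control_crc16:
--             if one_char == ' ':
--                 crc_list.append(int(one_byte, 16))
--                 one_byte = ''
--             else:
--                 one_byte = one_byte + one_char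
--         if (my_list[len_data - 1] == crc_list[1]) and (my_list[len_data - 2] == crc_list[0]):
--             return True
--         else:
--             return False
--     except:
--         return False
-- ===== SOURCE B (Python) =====
-- _TABLE = []
-- for _b in range(256):
--     _c = _b
--     for _ in range(8):
--         _c = (_c >> 1) ^ 0xA001 if _c & 1 else _c >> 1
--     _TABLE.append(_c)
--
--
-- def check_crc_16(my_list):
--     # my_list[1] declares the frame length; the two bytes at the end of the
--     # declared frame hold the CRC16-ARC of the preceding bytes, high byte first.
--     try:
--         len_data = my_list[1]
--         crc = 0
--         for i in range(len_data - 2):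
--             x = (crc ^ my_list[i]) & 0xFFFF
--             crc = (x >> 8) ^ _TABLE[x & 0xFF]
--         return my_list[len_data - 2] == crc >> 8 and my_list[len_data - 1] == crc & 0xFF
--     except IndexError:
--         return False
-- ===== Notes on version B (the rewrite author's own statement) =====
-- stated objective: faster
-- what changed: B replaces A's per-byte 8-iteration polynomial bit loop by a precomputed 256-entry CRC table with one lookup per byte, and replaces A's hex-format/string-parse round trip by direct comparison of the two CRC bytes (crc >> 8, crc & 0xFF).
import Mathlib
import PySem

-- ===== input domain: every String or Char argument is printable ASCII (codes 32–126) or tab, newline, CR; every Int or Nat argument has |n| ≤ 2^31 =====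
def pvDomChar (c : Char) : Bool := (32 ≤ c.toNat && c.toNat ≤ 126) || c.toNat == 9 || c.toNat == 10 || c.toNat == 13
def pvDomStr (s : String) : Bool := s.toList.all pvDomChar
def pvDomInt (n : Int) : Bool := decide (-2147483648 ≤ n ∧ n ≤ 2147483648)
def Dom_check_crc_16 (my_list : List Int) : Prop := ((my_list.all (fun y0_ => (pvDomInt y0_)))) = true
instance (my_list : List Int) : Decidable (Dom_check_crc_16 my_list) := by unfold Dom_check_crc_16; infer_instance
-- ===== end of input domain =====

-- B replaces A's per-byte 8-round polynomial bit loop and hex-format/parse round trip by a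
-- precomputed 256-entry CRC table, one table lookup per byte, and direct byte comparisons.

-- ===== PORT A =====

-- one inner round of A: if (crc & 1): crc = (crc >> 1) ^ 0xA001 ; else: crc = crc >> 1 ; crc &= 0xFFFF
def pvRoundA (c : Int) : Int :=
  if PySem.Int.band c 1 ≠ 0 then
    PySem.Int.band (PySem.Int.bxor (c >>> (1 : Nat)) 0xA001) 0xFFFF
  else
    PySem.Int.band (c >>> (1 : Nat)) 0xFFFF

-- the inner 'for i in range(8)' loop of my_crc16
def pvRounds8 (crc : Int) : Int := (List.range 8).foldl (fun c _ => pvRoundA c) crc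

-- hex(n)[2:] for a nonneg int, hand port (exact for 0 ≤ n: lowercase digits, no leading zeros)
def pvHexDigit (v : Nat) : Char :=
  if v < 10 then Char.ofNat (48 + v) else Char.ofNat (87 + v)

def pvHexChars (n : Nat) : List Char :=
  if h : n < 16 then [pvHexDigit n]
  else pvHexChars (n / 16) ++ [pvHexDigit (n % 16)]
  decreasing_by exact Nat.div_lt_self (by omega) (by omega)

-- A's "while len(crc16ret) < 4: crc16ret = '0' + crc16ret" pad loop
def pvPad4 (s : List Char) : List Char :=
  if s.length < 4 then pvPad4 ('0' :: s) else s
  termination_by 4 - s.length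
  decreasing_by simp; omega

-- 'for i in range(my_len)': index recursion i = 0,1,…; none = the IndexError buffer[i] may raise
def pvLoopA (buffer : List Int) (b : Int) (i : Int) (crc : Int) : Option Int :=
  if i < b then
    match PySem.List.pyGet? buffer i with
    | none => none
    | some number => pvLoopA buffer b (i + 1) (pvRounds8 (PySem.Int.band (PySem.Int.bxor crc number) 0xFFFF))
  else some crc
  termination_by (b - i).toNat
  decreasing_by omega

def my_crc16 (buffer : List Int) (my_len : Int) : Option String :=
  match pvLoopA buffer my_len 0 0 with
  | none => none
  | some crc16ret =>
    -- crc16ret is &0xFFFF-masked, hence nonneg: hex() ported through .toNat is exact here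
    let s := pvPad4 (pvHexChars crc16ret.toNat)
    let first_part := PySem.List.slice s none (some 2)
    let second_part := PySem.List.slice s (some 2) none
    some (String.ofList (first_part ++ [' '] ++ second_part ++ [' ']))

-- int(one_byte, 16), hand port: exact for the nonempty lowercase hex-digit strings A feeds it
def pvHexVal? (c : Char) : Option Nat :=
  if '0' ≤ c ∧ c ≤ '9' then some (c.toNat - 48)
  else if 'a' ≤ c ∧ c ≤ 'f' then some (c.toNat - 87)
  else none

def pvParseHex? (s : List Char) : Option Int :=
  if s = [] then none
  else s.foldl (fun acc c =>
    match acc with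
    | none => none
    | some a =>
      match pvHexVal? c with
      | none => none
      | some v => some (a * 16 + v)) (some (0 : Int))

-- one iteration of A's 'for one_char in control_crc16' parse loop
def pvParseStep (st : Option (List Int × List Char)) (one_char : Char) : Option (List Int × List Char) :=
  match st with
  | none => none
  | some (crc_list, one_byte) =>
    if one_char = ' ' then
      match pvParseHex? one_byte with
      | none => none
      | some v => some (crc_list ++ [v], [])
    else some (crc_list, one_byte ++ [one_char])

def check_crc_16 (my_list : List Int) : Bool :=
  match PySem.List.pyGet? my_list 1 with
  | none => false
  | some len_data =>
    match my_crc16 my_list (len_data - 2) with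
    | none => false
    | some control_crc16 =>
      match control_crc16.toList.foldl pvParseStep (some ([], [])) with
      | none => false
      | some (crc_list, _) =>
        -- 'a == b and c == d' with Python's short-circuit and IndexError-to-False behaviour
        match PySem.List.pyGet? my_list (len_data - 1), PySem.List.pyGet? crc_list 1 with
        | some v1, some c1 =>
          if v1 == c1 then
            match PySem.List.pyGet? my_list (len_data - 2), PySem.List.pyGet? crc_list 0 with
            | some v0, some c0 => v0 == c0
            | _, _ => false
          else false
        | _, _ => false

-- ===== PORT B =====

-- one table-building round: _c = (_c >> 1) ^ 0xA001 if _c & 1 else _c >> 1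
def pvRoundB (c : Int) : Int :=
  if PySem.Int.band c 1 ≠ 0 then PySem.Int.bxor (c >>> (1 : Nat)) 0xA001 else c >>> (1 : Nat)

-- the module-level 256-entry table _TABLE of Source B
def crcTable : List Int :=
  (List.range 256).map (fun (b : Nat) => (List.range 8).foldl (fun c _ => pvRoundB c) (b : Int))

-- B's 'for i in range(len_data - 2)' loop; none = the IndexError my_list[i] may raise
def pvLoopB (l : List Int) (b : Int) (i : Int) (crc : Int) : Option Int :=
  if i < b then
    match PySem.List.pyGet? l i with
    | none => none
    | some v =>
      let x := PySem.Int.band (PySem.Int.bxor crc v) 0xFFFF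
      -- _TABLE[x & 0xFF]: the index is provably in [0,256), so the getD default is unreachable
      pvLoopB l b (i + 1) (PySem.Int.bxor (x >>> (8 : Nat)) ((PySem.List.pyGet? crcTable (PySem.Int.band x 0xFF)).getD 0))
  else some crc
  termination_by (b - i).toNat
  decreasing_by omega

def check_crc_16_alt (my_list : List Int) : Bool :=
  match PySem.List.pyGet? my_list 1 with
  | none => false
  | some len_data =>
    match pvLoopB my_list (len_data - 2) 0 0 with
    | none => false
    | some crc =>
      -- 'a == b and c == d' with Python's short-circuit and IndexError-to-False behaviour
      match PySem.List.pyGet? my_list (len_data - 2) with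
      | none => false
      | some v0 =>
        if v0 == crc >>> (8 : Nat) then
          match PySem.List.pyGet? my_list (len_data - 1) with
          | none => false
          | some v1 => v1 == PySem.Int.band crc 0xFF
        else false

-- ===== PRECONDITION & SPEC =====
def Spec_check_crc_16 (my_list : List Int) (out : Bool) : Prop := out = check_crc_16_alt my_list
instance (my_list : List Int) (out : Bool) : Decidable (Spec_check_crc_16 my_list out) := by unfold Spec_check_crc_16; infer_instance

-- ===== CLAIM (what is proved, stated in full; the proofs are below) =====
def Claim_equal_check_crc_16 : Prop := ∀ (my_list : List Int), Dom_check_crc_16 my_list → Spec_check_crc_16 my_list (check_crc_16 my_list)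

-- ===== LEMMAS AND PROOFS =====

-- Nat-level model of one CRC round
def pvNatRound (x : Nat) : Nat := if x &&& 1 = 1 then (x >>> 1) ^^^ 0xA001 else x >>> 1

theorem pvNatRound_lt {x : Nat} (h : x < 65536) : pvNatRound x < 65536 := by
  unfold pvNatRound
  have h1 : x >>> 1 < 32768 := by
    simp [Nat.shiftRight_eq_div_pow]; omega
  split
  · have hx : (x >>> 1) ^^^ 0xA001 < 2 ^ 16 :=
      Nat.xor_lt_two_pow (by omega) (by norm_num)
    omega
  · omega

theorem pvNatRound_iter_lt {x : Nat} (h : x < 65536) (k : Nat) : pvNatRound^[k] x < 65536 := by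
  induction k generalizing x with
  | zero => simpa using h
  | succ k ih => rw [Function.iterate_succ_apply]; exact ih (pvNatRound_lt h)

theorem pvNatRound_xor (a b : Nat) : pvNatRound (a ^^^ b) = pvNatRound a ^^^ pvNatRound b := by
  have cancel : ∀ x y : Nat, (x ^^^ 0xA001) ^^^ (y ^^^ 0xA001) = x ^^^ y := by
    intro x y
    rw [Nat.xor_comm y 0xA001, Nat.xor_assoc, ← Nat.xor_assoc 0xA001 0xA001 y,
        Nat.xor_self, Nat.zero_xor]
  have hx : (a ^^^ b) &&& 1 = (a &&& 1) ^^^ (b &&& 1) := Nat.and_xor_distrib_right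
  have ha : a &&& 1 = 0 ∨ a &&& 1 = 1 := by rw [Nat.and_one_is_mod]; omega
  have hb : b &&& 1 = 0 ∨ b &&& 1 = 1 := by rw [Nat.and_one_is_mod]; omega
  unfold pvNatRound
  rcases ha with h1 | h1 <;> rcases hb with h2 | h2 <;>
    rw [hx, h1, h2] <;>
    simp only [Nat.shiftRight_xor_distrib] <;> norm_num <;>
    simp [cancel, Nat.xor_assoc, Nat.xor_comm, Nat.xor_left_comm]

theorem pvNatRound_iter_xor (k a b : Nat) : pvNatRound^[k] (a ^^^ b) = pvNatRound^[k] a ^^^ pvNatRound^[k] b := by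
  induction k generalizing a b with
  | zero => simp
  | succ k ih => simp [Function.iterate_succ_apply, pvNatRound_xor, ih]

theorem pvNatRound_shift (h k : Nat) : pvNatRound (h <<< (k + 1)) = h <<< k := by
  unfold pvNatRound
  have h2 : h <<< (k + 1) = 2 * (h <<< k) := by
    simp [Nat.shiftLeft_eq, Nat.pow_succ]; ring
  have e1 : h <<< (k + 1) &&& 1 = 0 := by
    rw [Nat.and_one_is_mod, h2]; omega
  have e2 : h <<< (k + 1) >>> 1 = h <<< k := by
    rw [Nat.shiftRight_eq_div_pow, h2]; omega
  simp [e1, e2]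

theorem pvNatRound_iter8_shift (h : Nat) : pvNatRound^[8] (h <<< 8) = h := by
  have step : ∀ (k : Nat) (z : Nat), pvNatRound^[k] (z <<< k) = z := by
    intro k
    induction k with
    | zero => intro z; simp
    | succ k ih =>
      intro z
      rw [Function.iterate_succ_apply, pvNatRound_shift]
      exact ih z
  exact step 8 h

theorem pvHiLo (x : Nat) : x = ((x >>> 8) <<< 8) ^^^ (x &&& 255) := by
  apply Nat.eq_of_testBit_eq
  intro i
  have h255 : ∀ j, (255 : Nat).testBit j = decide (j < 8) := fun j => Nat.testBit_two_pow_sub_one 8 j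
  rw [Nat.testBit_xor, Nat.testBit_shiftLeft, Nat.testBit_and, h255, Nat.testBit_shiftRight]
  by_cases hi : i < 8
  · simp [hi, Nat.not_le.mpr hi]
  · have e : 8 + (i - 8) = i := by omega
    simp [hi, Nat.not_lt.mp hi, e]

-- the table-driven step computes the eight bit-loop rounds
theorem pvNatKey (x : Nat) : pvNatRound^[8] x = (x >>> 8) ^^^ pvNatRound^[8] (x &&& 255) := by
  conv_lhs => rw [pvHiLo x]
  rw [pvNatRound_iter_xor, pvNatRound_iter8_shift]

theorem pvAndFFFF (x : Nat) : x &&& 65535 = x % 65536 := by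
  have := Nat.and_two_pow_sub_one_eq_mod x 16
  norm_num at this; omega

-- ---- Int ↔ Nat bridges for the two round functions ----

theorem pvShiftCast (m k : Nat) : (m : Int) >>> k = ((m >>> k : Nat) : Int) := by
  simp [Int.natCast_shiftRight]

theorem pvCond_cast (m : Nat) : (PySem.Int.band (m : Int) 1 ≠ 0) ↔ (m &&& 1 = 1) := by
  have hb : PySem.Int.band (m : Int) 1 = ((m &&& 1 : Nat) : Int) := by
    exact_mod_cast PySem.Int.band_natCast m 1
  have h01 : m &&& 1 = 0 ∨ m &&& 1 = 1 := by rw [Nat.and_one_is_mod]; omega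
  rw [hb]
  rcases h01 with h | h <;> simp [h]

theorem pvRoundA_cast {m : Nat} (hm : m < 65536) : pvRoundA (m : Int) = ((pvNatRound m : Nat) : Int) := by
  unfold pvRoundA pvNatRound
  have hxor : PySem.Int.bxor ((m : Int) >>> (1 : Nat)) 0xA001 = (((m >>> 1) ^^^ 0xA001 : Nat) : Int) := by
    rw [pvShiftCast]
    exact_mod_cast PySem.Int.bxor_natCast (m >>> 1) 0xA001
  have hlt1 : m >>> 1 < 32768 := by simp [Nat.shiftRight_eq_div_pow]; omega
  by_cases hm1 : m &&& 1 = 1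
  · rw [if_pos ((pvCond_cast m).mpr hm1), if_pos hm1, hxor]
    have hbd : PySem.Int.band ((((m >>> 1) ^^^ 0xA001 : Nat)) : Int) 0xFFFF
        = ((((m >>> 1) ^^^ 0xA001) &&& 65535 : Nat) : Int) := by
      exact_mod_cast PySem.Int.band_natCast ((m >>> 1) ^^^ 0xA001) 65535
    rw [hbd]
    congr 1
    have hx : (m >>> 1) ^^^ 0xA001 < 65536 := by
      have := Nat.xor_lt_two_pow (x := m >>> 1) (y := 0xA001) (n := 16) (by omega) (by norm_num)
      omega
    rw [pvAndFFFF]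
    omega
  · rw [if_neg (fun hc => hm1 ((pvCond_cast m).mp hc)), if_neg hm1, pvShiftCast]
    have hbd : PySem.Int.band (((m >>> 1 : Nat)) : Int) 0xFFFF = (((m >>> 1) &&& 65535 : Nat) : Int) := by
      exact_mod_cast PySem.Int.band_natCast (m >>> 1) 65535
    rw [hbd]
    congr 1
    rw [pvAndFFFF]
    omega

theorem pvRoundB_cast {m : Nat} (hm : m < 65536) : pvRoundB (m : Int) = ((pvNatRound m : Nat) : Int) := by
  unfold pvRoundB pvNatRound
  have hxor : PySem.Int.bxor ((m : Int) >>> (1 : Nat)) 0xA001 = (((m >>> 1) ^^^ 0xA001 : Nat) : Int) := by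
    rw [pvShiftCast]
    exact_mod_cast PySem.Int.bxor_natCast (m >>> 1) 0xA001
  by_cases hm1 : m &&& 1 = 1
  · rw [if_pos ((pvCond_cast m).mpr hm1), if_pos hm1, hxor]
  · rw [if_neg (fun hc => hm1 ((pvCond_cast m).mp hc)), if_neg hm1, pvShiftCast]

theorem pvFoldRounds_cast (f : Int → Int) (g : Nat → Nat)
    (hfg : ∀ {m : Nat}, m < 65536 → f (m : Int) = ((g m : Nat) : Int))
    (hg : ∀ {m : Nat}, m < 65536 → g m < 65536) :
    ∀ (k : Nat) {m : Nat}, m < 65536 →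
      (List.range k).foldl (fun c _ => f c) (m : Int) = ((g^[k] m : Nat) : Int) := by
  intro k
  induction k with
  | zero => intro m hm; simp
  | succ k ih =>
    intro m hm
    rw [List.range_succ, List.foldl_append, ih hm]
    simp only [List.foldl_cons, List.foldl_nil]
    have hlt : g^[k] m < 65536 := by
      clear ih
      induction k generalizing m with
      | zero => simpa using hm
      | succ k ih2 => rw [Function.iterate_succ_apply]; exact ih2 (hg hm)
    rw [hfg hlt, ← Function.iterate_succ_apply' g]

theorem pvRounds8_cast {m : Nat} (hm : m < 65536) :
    pvRounds8 (m : Int) = ((pvNatRound^[8] m : Nat) : Int) := by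
  unfold pvRounds8
  exact pvFoldRounds_cast pvRoundA pvNatRound (fun h => pvRoundA_cast h) (fun h => pvNatRound_lt h) 8 hm

-- the masked value x = (crc ^ b) & 0xFFFF is a Nat below 2^16, whatever crc and b are
theorem pvMaskNat (z : Int) : ∃ m : Nat, m < 65536 ∧ PySem.Int.band z 0xFFFF = (m : Int) := by
  unfold PySem.Int.band
  have h16 : Int.toNat 65535 = 65535 := rfl
  by_cases hz : 0 ≤ z
  · rw [if_pos hz, if_pos (by norm_num : (0:Int) ≤ 65535)]
    refine ⟨z.toNat &&& Int.toNat 65535, ?_, rfl⟩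
    have : z.toNat &&& Int.toNat 65535 ≤ Int.toNat 65535 := Nat.and_le_right
    omega
  · rw [if_neg hz, if_pos (by norm_num : (0:Int) ≤ 65535)]
    refine ⟨Int.toNat 65535 - (Int.toNat 65535 &&& (-z - 1).toNat), ?_, rfl⟩
    omega

-- B's table holds exactly the eight-round values
theorem pvTable_lookup {lo : Nat} (hlo : lo < 256) :
    PySem.List.pyGet? crcTable (lo : Int) = some ((pvNatRound^[8] lo : Nat) : Int) := by
  unfold crcTable
  have hlen : ((List.range 256).map (fun (b : Nat) => (List.range 8).foldl (fun c _ => pvRoundB c) (b : Int))).length = 256 := by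
    rw [List.length_map, List.length_range]
  rw [PySem.List.pyGet?_ofNat _ lo (by omega)]
  congr 1
  rw [List.getElem_map, List.getElem_range]
  exact pvFoldRounds_cast pvRoundB pvNatRound (fun h => pvRoundB_cast h) (fun h => pvNatRound_lt h) 8 (by omega)

-- per-byte step equality: A's masked 8-round loop = B's table-driven step, given the same crc
theorem pvStep_eq (c b : Int) :
    pvRounds8 (PySem.Int.band (PySem.Int.bxor c b) 0xFFFF)
      = (let x := PySem.Int.band (PySem.Int.bxor c b) 0xFFFF
         PySem.Int.bxor (x >>> (8 : Nat)) ((PySem.List.pyGet? crcTable (PySem.Int.band x 0xFF)).getD 0))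
    ∧ ∃ m : Nat, m < 65536 ∧ pvRounds8 (PySem.Int.band (PySem.Int.bxor c b) 0xFFFF) = (m : Int) := by
  obtain ⟨xn, hxn, hx⟩ := pvMaskNat (PySem.Int.bxor c b)
  rw [hx]
  have hband : PySem.Int.band (xn : Int) 0xFF = ((xn &&& 255 : Nat) : Int) := by
    exact_mod_cast PySem.Int.band_natCast xn 255
  have hlo : xn &&& 255 < 256 := by
    have : xn &&& 255 ≤ 255 := Nat.and_le_right
    omega
  constructor
  · show pvRounds8 (xn : Int) = PySem.Int.bxor ((xn : Int) >>> (8 : Nat)) _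
    rw [pvRounds8_cast hxn, hband, pvTable_lookup hlo, pvShiftCast]
    simp only [Option.getD_some]
    have : PySem.Int.bxor (((xn >>> 8 : Nat)) : Int) ((pvNatRound^[8] (xn &&& 255) : Nat) : Int)
        = (((xn >>> 8) ^^^ pvNatRound^[8] (xn &&& 255) : Nat) : Int) :=
      PySem.Int.bxor_natCast _ _
    rw [this, pvNatKey xn]
  · exact ⟨pvNatRound^[8] xn, pvNatRound_iter_lt hxn 8, pvRounds8_cast hxn⟩

-- A's bit-loop index recursion and B's table-driven index recursion agree step for step,
-- and whenever A's loop returns, its result is a Nat below 2^16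
theorem pvLoop_eq_inv (l : List Int) (b : Int) :
    ∀ (fuel : Nat) (i : Int), (b - i).toNat = fuel → ∀ (cn : Nat), cn < 65536 →
      pvLoopB l b i (cn : Int) = pvLoopA l b i (cn : Int) ∧
      ∀ r, pvLoopA l b i (cn : Int) = some r → ∃ m : Nat, m < 65536 ∧ r = (m : Int) := by
  intro fuel
  induction fuel with
  | zero =>
    intro i hi cn hcn
    constructor
    · unfold pvLoopA pvLoopB
      rw [if_neg (by omega), if_neg (by omega)]
    · intro r hr
      unfold pvLoopA at hr
      rw [if_neg (by omega)] at hr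
      exact ⟨cn, hcn, (Option.some.inj hr).symm⟩
  | succ n ih =>
    intro i hi cn hcn
    by_cases h : i < b
    · rcases hg : PySem.List.pyGet? l i with _ | v
      · constructor
        · unfold pvLoopA pvLoopB
          rw [if_pos h, if_pos h, hg]
        · intro r hr
          unfold pvLoopA at hr
          rw [if_pos h, hg] at hr
          exact absurd hr (by simp)
      · obtain ⟨hstep, m, hm, he⟩ := pvStep_eq (cn : Int) v
        obtain ⟨ih1, ih2⟩ := ih (i + 1) (by omega) m hm
        constructor
        · unfold pvLoopA pvLoopB
          rw [if_pos h, if_pos h, hg]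
          dsimp only
          rw [← hstep, he]
          exact ih1
        · intro r hr
          unfold pvLoopA at hr
          rw [if_pos h, hg] at hr
          dsimp only at hr
          rw [he] at hr
          exact ih2 r hr
    · constructor
      · unfold pvLoopA pvLoopB
        rw [if_neg h, if_neg h]
      · intro r hr
        unfold pvLoopA at hr
        rw [if_neg h] at hr
        exact ⟨cn, hcn, (Option.some.inj hr).symm⟩

-- ---- hex formatting and parsing ----

theorem pvPad4_eq (s : List Char) (h : s.length = 4) : pvPad4 s = s := by
  unfold pvPad4
  simp [h]

theorem pvHexChars_lt16 {n : Nat} (h : n < 16) : pvHexChars n = [pvHexDigit n] := by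
  unfold pvHexChars
  simp [h]

theorem pvHexChars_ge16 {n : Nat} (h : ¬ n < 16) :
    pvHexChars n = pvHexChars (n / 16) ++ [pvHexDigit (n % 16)] := by
  conv_lhs => rw [pvHexChars]
  simp [h]

theorem pvPad4_four (a b c d : Char) : pvPad4 [a, b, c, d] = [a, b, c, d] := pvPad4_eq _ rfl

theorem pvPad4_three (a b c : Char) : pvPad4 [a, b, c] = ['0', a, b, c] := by
  rw [pvPad4]
  norm_num
  exact pvPad4_four _ _ _ _

theorem pvPad4_two (a b : Char) : pvPad4 [a, b] = ['0', '0', a, b] := by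
  rw [pvPad4]
  norm_num
  exact pvPad4_three _ _ _

theorem pvPad4_one (a : Char) : pvPad4 [a] = ['0', '0', '0', a] := by
  rw [pvPad4]
  norm_num
  exact pvPad4_two _ _

theorem pvZeroChar : '0' = pvHexDigit 0 := by decide

-- the padded hex string of cn < 65536 is its four nibbles
theorem pvPadHex (cn : Nat) (h : cn < 65536) :
    pvPad4 (pvHexChars cn)
      = [pvHexDigit (cn / 4096), pvHexDigit (cn / 256 % 16), pvHexDigit (cn / 16 % 16), pvHexDigit (cn % 16)] := by
  have d16 : cn / 16 / 16 = cn / 256 := by rw [Nat.div_div_eq_div_mul]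
  have d256 : cn / 256 / 16 = cn / 4096 := by rw [Nat.div_div_eq_div_mul]
  by_cases h1 : cn < 16
  · rw [pvHexChars_lt16 h1, pvPad4_one, pvZeroChar]
    have e0 : cn / 4096 = 0 := by omega
    have e1 : cn / 256 % 16 = 0 := by omega
    have e2 : cn / 16 % 16 = 0 := by omega
    have e3 : cn % 16 = cn := by omega
    rw [e0, e1, e2, e3]
  · by_cases h2 : cn < 256
    · rw [pvHexChars_ge16 h1, pvHexChars_lt16 (by omega : cn / 16 < 16)]
      simp only [List.cons_append, List.nil_append]
      rw [pvPad4_two, pvZeroChar]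
      have e0 : cn / 4096 = 0 := by omega
      have e1 : cn / 256 % 16 = 0 := by omega
      have e2 : cn / 16 % 16 = cn / 16 := by omega
      rw [e0, e1, e2]
    · by_cases h3 : cn < 4096
      · rw [pvHexChars_ge16 h1, pvHexChars_ge16 (by omega : ¬ cn / 16 < 16),
            pvHexChars_lt16 (by omega : cn / 16 / 16 < 16), d16]
        simp only [List.cons_append, List.nil_append]
        rw [pvPad4_three, pvZeroChar]
        have e0 : cn / 4096 = 0 := by omega
        have e1 : cn / 256 % 16 = cn / 256 := by omega
        rw [e0, e1]
      · rw [pvHexChars_ge16 h1, pvHexChars_ge16 (by omega : ¬ cn / 16 < 16), d16,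
            pvHexChars_ge16 (by omega : ¬ cn / 256 < 16), d256,
            pvHexChars_lt16 (by omega : cn / 4096 < 16)]
        simp only [List.cons_append, List.nil_append]
        rw [pvPad4_four]

theorem pvHexVal_digit {v : Nat} (h : v < 16) : pvHexVal? (pvHexDigit v) = some v := by
  interval_cases v <;> decide

theorem pvHexDigit_ne_space {v : Nat} (h : v < 16) : ¬ (pvHexDigit v = ' ') := by
  interval_cases v <;> decide

theorem pvParseHex_pair {h1 h2 : Nat} (e1 : h1 < 16) (e2 : h2 < 16) :
    pvParseHex? [pvHexDigit h1, pvHexDigit h2] = some ((h1 * 16 + h2 : Nat) : Int) := by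
  unfold pvParseHex?
  simp [pvHexVal_digit e1, pvHexVal_digit e2]

-- running A's parse loop over the formatted string "hh ll "
theorem pvParse_control (h1 h2 h3 h4 : Nat) (e1 : h1 < 16) (e2 : h2 < 16) (e3 : h3 < 16) (e4 : h4 < 16) :
    [pvHexDigit h1, pvHexDigit h2, ' ', pvHexDigit h3, pvHexDigit h4, ' '].foldl pvParseStep (some ([], []))
      = some ([((h1 * 16 + h2 : Nat) : Int), ((h3 * 16 + h4 : Nat) : Int)], []) := by
  simp only [List.foldl_cons, List.foldl_nil]
  rw [show pvParseStep (some ([], [])) (pvHexDigit h1) = some ([], [pvHexDigit h1]) by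
        unfold pvParseStep; simp [pvHexDigit_ne_space e1]]
  rw [show pvParseStep (some ([], [pvHexDigit h1])) (pvHexDigit h2) = some ([], [pvHexDigit h1, pvHexDigit h2]) by
        unfold pvParseStep; simp [pvHexDigit_ne_space e2]]
  rw [show pvParseStep (some ([], [pvHexDigit h1, pvHexDigit h2])) ' '
        = some ([((h1 * 16 + h2 : Nat) : Int)], []) by
        unfold pvParseStep; simp [pvParseHex_pair e1 e2]]
  rw [show pvParseStep (some ([((h1 * 16 + h2 : Nat) : Int)], [])) (pvHexDigit h3)
        = some ([((h1 * 16 + h2 : Nat) : Int)], [pvHexDigit h3]) by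
        unfold pvParseStep; simp [pvHexDigit_ne_space e3]]
  rw [show pvParseStep (some ([((h1 * 16 + h2 : Nat) : Int)], [pvHexDigit h3])) (pvHexDigit h4)
        = some ([((h1 * 16 + h2 : Nat) : Int)], [pvHexDigit h3, pvHexDigit h4]) by
        unfold pvParseStep; simp [pvHexDigit_ne_space e4]]
  unfold pvParseStep
  simp [pvParseHex_pair e3 e4]

-- ===== main proof =====

theorem pvMain (my_list : List Int) : check_crc_16 my_list = check_crc_16_alt my_list := by
  unfold check_crc_16 check_crc_16_alt
  rcases hget : PySem.List.pyGet? my_list 1 with _ | d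
  · rfl
  · dsimp only
    obtain ⟨heq, hinv⟩ := pvLoop_eq_inv my_list (d - 2) (d - 2 - 0).toNat 0 rfl 0 (by norm_num)
    rw [show (((0 : Nat)) : Int) = (0 : Int) by norm_num] at heq hinv
    rw [heq]
    rcases hla : pvLoopA my_list (d - 2) 0 0 with _ | r
    · unfold my_crc16
      rw [hla]
    · obtain ⟨cn, hcn, rfl⟩ := hinv r hla
      have hA : my_crc16 my_list (d - 2) = some (String.ofList
          [pvHexDigit (cn / 4096), pvHexDigit (cn / 256 % 16), ' ',
           pvHexDigit (cn / 16 % 16), pvHexDigit (cn % 16), ' ']) := by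
        unfold my_crc16
        rw [hla]
        dsimp only
        have htn : ((cn : Int)).toNat = cn := Int.toNat_natCast cn
        rw [htn, pvPadHex cn hcn]
        have hs2 : PySem.List.slice [pvHexDigit (cn / 4096), pvHexDigit (cn / 256 % 16),
            pvHexDigit (cn / 16 % 16), pvHexDigit (cn % 16)] none (some 2)
            = [pvHexDigit (cn / 4096), pvHexDigit (cn / 256 % 16)] :=
          (PySem.List.slice_to _ (by norm_num)).trans rfl
        have hs2' : PySem.List.slice [pvHexDigit (cn / 4096), pvHexDigit (cn / 256 % 16),
            pvHexDigit (cn / 16 % 16), pvHexDigit (cn % 16)] (some 2) none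
            = [pvHexDigit (cn / 16 % 16), pvHexDigit (cn % 16)] :=
          (PySem.List.slice_from _ (by norm_num)).trans rfl
        rw [hs2, hs2']
        rfl
      have hhigh : cn / 4096 * 16 + cn / 256 % 16 = cn >>> 8 := by
        rw [Nat.shiftRight_eq_div_pow]
        omega
      have hlow : cn / 16 % 16 * 16 + cn % 16 = cn &&& 255 := by
        have : cn &&& 255 = cn % 256 := by
          have := Nat.and_two_pow_sub_one_eq_mod cn 8
          norm_num at this; omega
        omega
      have hparse : (String.ofList
          [pvHexDigit (cn / 4096), pvHexDigit (cn / 256 % 16), ' ',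
           pvHexDigit (cn / 16 % 16), pvHexDigit (cn % 16), ' ']).toList.foldl pvParseStep (some ([], []))
          = some ([((cn >>> 8 : Nat) : Int), ((cn &&& 255 : Nat) : Int)], []) := by
        rw [String.toList_ofList]
        rw [pvParse_control (cn / 4096) (cn / 256 % 16) (cn / 16 % 16) (cn % 16)
              (by omega) (by omega) (by omega) (by omega)]
        rw [hhigh, hlow]
      have hbandff : PySem.Int.band ((cn : Int)) 0xFF = ((cn &&& 255 : Nat) : Int) := by
        exact_mod_cast PySem.Int.band_natCast cn 255
      have hshift8 : ((cn : Int)) >>> (8 : Nat) = ((cn >>> 8 : Nat) : Int) := pvShiftCast cn 8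
      have hcl1 : PySem.List.pyGet? [((cn >>> 8 : Nat) : Int), ((cn &&& 255 : Nat) : Int)] 1
          = some ((cn &&& 255 : Nat) : Int) := by
        have := PySem.List.pyGet?_ofNat [((cn >>> 8 : Nat) : Int), ((cn &&& 255 : Nat) : Int)] 1 (by norm_num)
        exact_mod_cast this
      have hcl0 : PySem.List.pyGet? [((cn >>> 8 : Nat) : Int), ((cn &&& 255 : Nat) : Int)] 0
          = some ((cn >>> 8 : Nat) : Int) := PySem.List.pyGet?_zero_cons _ _
      simp only [hA, hparse]
      rw [hcl1, hcl0, hbandff, hshift8]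
      rcases h1 : PySem.List.pyGet? my_list (d - 1) with _ | v1 <;>
        rcases h0 : PySem.List.pyGet? my_list (d - 2) with _ | v0
      · rfl
      · dsimp only
        cases hb0 : (v0 == ((cn >>> 8 : Nat) : Int)) <;> simp [hb0]
      · dsimp only
        cases hb1 : (v1 == ((cn &&& 255 : Nat) : Int)) <;> simp [hb1]
      · dsimp only
        cases hb1 : (v1 == ((cn &&& 255 : Nat) : Int)) <;>
          cases hb0 : (v0 == ((cn >>> 8 : Nat) : Int)) <;> simp [hb1, hb0]

-- ===== VERDICT (by name: the statement is the Claim_ definition above) =====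
theorem check_crc_16_spec : Claim_equal_check_crc_16 := by
  intro my_list _
  unfold Spec_check_crc_16
  exact pvMain my_list
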